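-- pv_equiv track=rewrite | github.com/manpages/py-ken | solver.py | minusCandidates
-- ===== SOURCE A (Python) =====
-- def minusCandidates(cageSize, targetValue, dimension):
--   if targetValue > dimension:
--     raise Exception("[-] Target value should be less or equal to dimension")
--   result = []
--   for i in range(1, dimension+1):
--     if cageSize >= i + targetValue:
--       result.append(i)
--   return result
-- ===== SOURCE B (Python) =====
-- def minusCandidates(cageSize, targetValue, dimension):
--   if targetValue > dimension:
--     raise Exception("[-] Target value should be less or equal to dimension")
--   upper = min(dimension, cageSize - targetValue)
--   return list(range(1, upper + 1))
-- ===== Notes on version B (the rewrite author's own statement) =====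
-- stated objective: faster
-- what changed: Replaced the iterate-and-test loop over 1..dimension with a closed-form bound: the kept i are exactly 1..min(dimension, cageSize-targetValue), returned as a single range.
import Mathlib
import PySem

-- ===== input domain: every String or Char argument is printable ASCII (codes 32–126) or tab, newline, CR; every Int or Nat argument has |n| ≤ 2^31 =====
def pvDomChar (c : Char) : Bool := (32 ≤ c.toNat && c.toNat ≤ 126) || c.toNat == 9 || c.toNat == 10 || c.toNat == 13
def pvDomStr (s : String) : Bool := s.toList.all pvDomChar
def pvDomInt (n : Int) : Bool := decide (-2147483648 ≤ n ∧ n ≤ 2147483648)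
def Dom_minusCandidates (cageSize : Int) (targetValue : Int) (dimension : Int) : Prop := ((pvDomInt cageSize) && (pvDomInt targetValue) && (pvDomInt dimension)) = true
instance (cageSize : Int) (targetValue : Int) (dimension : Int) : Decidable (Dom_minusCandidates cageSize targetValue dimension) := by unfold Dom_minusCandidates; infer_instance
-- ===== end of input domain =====

-- B replaces the iterate-and-test loop with the closed-form bound min(dimension, cageSize-targetValue) and returns one range (objective: simpler).

-- ===== PORT A =====
def minusCandidates (cageSize : Int) (targetValue : Int) (dimension : Int) : List Int :=
  (PySem.List.pyRange 1 (dimension + 1) 1).foldl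
    (fun result i => if cageSize ≥ i + targetValue then result ++ [i] else result) []

-- ===== PORT B =====
def minusCandidates_alt (cageSize : Int) (targetValue : Int) (dimension : Int) : List Int :=
  PySem.List.pyRange 1 (min dimension (cageSize - targetValue) + 1) 1

-- ===== PRECONDITION & SPEC =====
-- Pre_ excludes exactly the inputs where A raises ('targetValue > dimension').
def Pre_minusCandidates (cageSize : Int) (targetValue : Int) (dimension : Int) : Prop :=
  targetValue ≤ dimension
instance (cageSize : Int) (targetValue : Int) (dimension : Int) : Decidable (Pre_minusCandidates cageSize targetValue dimension) := by unfold Pre_minusCandidates; infer_instance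
def pvWitness_minusCandidates : Int × Int × Int := (5, 2, 4)

def Spec_minusCandidates (cageSize : Int) (targetValue : Int) (dimension : Int) (out : List Int) : Prop := out = minusCandidates_alt cageSize targetValue dimension
instance (cageSize : Int) (targetValue : Int) (dimension : Int) (out : List Int) : Decidable (Spec_minusCandidates cageSize targetValue dimension out) := by unfold Spec_minusCandidates; infer_instance

-- ===== CLAIM (what is proved, stated in full; the proofs are below) =====
def Claim_equal_minusCandidates : Prop := ∀ (cageSize : Int) (targetValue : Int) (dimension : Int), Dom_minusCandidates cageSize targetValue dimension → Pre_minusCandidates cageSize targetValue dimension → Spec_minusCandidates cageSize targetValue dimension (minusCandidates cageSize targetValue dimension)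

-- ===== LEMMAS AND PROOFS =====

-- A's filtered range equals B's closed-form range: both are Pairwise (<) with the same members.
theorem minusCandidates_eq_alt (cageSize targetValue dimension : Int) :
    minusCandidates cageSize targetValue dimension = minusCandidates_alt cageSize targetValue dimension := by
  unfold minusCandidates minusCandidates_alt
  rw [PySem.List.foldl_append_ite_eq_filter]
  rw [List.nil_append]
  apply List.Pairwise.eq_of_mem_iff
    ((PySem.List.pairwise_lt_pyRange_one 1 (dimension + 1)).filter _)
    (PySem.List.pairwise_lt_pyRange_one _ _)
  intro a
  simp only [List.mem_filter, PySem.List.mem_pyRange_one, decide_eq_true_eq, ge_iff_le]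
  omega

-- ===== VERDICT (by name: the statement is the Claim_ definition above) =====
theorem minusCandidates_spec : Claim_equal_minusCandidates := by
  intro c t d _ _
  exact minusCandidates_eq_alt c t d
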